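-- pv_equiv track=rewrite | github.com/RavalHappy021/Scamshield | python_api/app.py | get_reason
-- ===== SOURCE A (Python) =====
-- def get_reason(text, prediction):
--     text = text.lower()
--
--     if prediction == "Fake":
--         if any(word in text for word in ["payment", "fee", "money", "bank", "account", "transfer"]):
--             return "Contains references to personal financial transactions or upfront payments."
--         if any(word in text for word in ["urgently", "limited", "immediate", "whatsapp", "telegram"]):
--             return "Uses high-pressure tactics or unprofessional communication channels."
--         if any(word in text for word in ["no experience", "easy", "high pay", "work from home"]):
--             return "Offers unusually high rewards for vague or minimal job requirements."
--         return "The job structure and language match known fraudulent recruitment patterns."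
--     else:
--         if any(word in text for word in ["interview", "assessment", "procedure", "application"]):
--             return "Follows a structured recruitment process including professional evaluations."
--         if any(word in text for word in ["responsibilities", "requirements", "skills", "experience"]):
--             return "Clearly defines technical skills and specific professional responsibilities."
--         return "Exhibits professional corporate communication and standard industry terminology."
-- ===== SOURCE B (Python) =====
-- # B: flat priority-keyword table. Instead of scanning ordered keyword GROUPS and
-- # returning at the first matching group, B flattens all keywords into one list of
-- # (keyword, priority) pairs, makes a single pass computing the MINIMUM priority of
-- # any keyword that occurs in the text, and indexes a reasons array with it (the
-- # last slot being the default). Correct because the first matching group in A is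
-- # exactly the matched keyword of minimal group index.
--
-- _FAKE_PAIRS = [
--     ("payment", 0), ("fee", 0), ("money", 0), ("bank", 0), ("account", 0), ("transfer", 0),
--     ("urgently", 1), ("limited", 1), ("immediate", 1), ("whatsapp", 1), ("telegram", 1),
--     ("no experience", 2), ("easy", 2), ("high pay", 2), ("work from home", 2),
-- ]
-- _FAKE_REASONS = [
--     "Contains references to personal financial transactions or upfront payments.",
--     "Uses high-pressure tactics or unprofessional communication channels.",
--     "Offers unusually high rewards for vague or minimal job requirements.",
--     "The job structure and language match known fraudulent recruitment patterns.",
-- ]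
-- _REAL_PAIRS = [
--     ("interview", 0), ("assessment", 0), ("procedure", 0), ("application", 0),
--     ("responsibilities", 1), ("requirements", 1), ("skills", 1), ("experience", 1),
-- ]
-- _REAL_REASONS = [
--     "Follows a structured recruitment process including professional evaluations.",
--     "Clearly defines technical skills and specific professional responsibilities.",
--     "Exhibits professional corporate communication and standard industry terminology.",
-- ]
--
--
-- def get_reason(text, prediction):
--     t = text.lower()
--     if prediction == "Fake":
--         pairs, reasons = _FAKE_PAIRS, _FAKE_REASONS
--     else:
--         pairs, reasons = _REAL_PAIRS, _REAL_REASONS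
--     best = len(reasons) - 1  # index of the default reason
--     for kw, i in pairs:
--         if kw in t:
--             best = min(best, i)
--     return reasons[best]
-- ===== Notes on version B (the rewrite author's own statement) =====
-- stated objective: alternative
-- what changed: Replaced the ordered first-match scan over keyword groups by a flat (keyword, priority) table: one pass computes the minimum priority among all keywords present in the text, which then indexes a reasons array whose last slot is the default.
import Mathlib
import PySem

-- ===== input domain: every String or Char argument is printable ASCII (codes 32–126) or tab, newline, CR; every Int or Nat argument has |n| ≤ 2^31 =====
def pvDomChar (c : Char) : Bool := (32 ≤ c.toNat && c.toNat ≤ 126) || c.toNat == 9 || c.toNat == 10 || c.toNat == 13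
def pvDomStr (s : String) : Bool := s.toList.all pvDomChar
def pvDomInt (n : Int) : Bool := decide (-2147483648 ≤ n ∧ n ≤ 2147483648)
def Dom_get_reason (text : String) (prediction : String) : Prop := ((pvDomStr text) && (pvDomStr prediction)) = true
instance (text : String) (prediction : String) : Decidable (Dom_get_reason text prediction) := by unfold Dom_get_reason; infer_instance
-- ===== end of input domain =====

-- B replaces A's ordered first-match group scan by a flat (keyword, priority) table:
-- one pass takes the minimum priority of the keywords present, indexing a reasons array (objective: alternative).

-- ===== PORT A =====
def get_reason (text : String) (prediction : String) : String :=
  let text := PySem.Str.lower text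
  if prediction == "Fake" then
    if (["payment", "fee", "money", "bank", "account", "transfer"].any
        (fun word => PySem.Str.isIn word text)) then
      "Contains references to personal financial transactions or upfront payments."
    else if (["urgently", "limited", "immediate", "whatsapp", "telegram"].any
        (fun word => PySem.Str.isIn word text)) then
      "Uses high-pressure tactics or unprofessional communication channels."
    else if (["no experience", "easy", "high pay", "work from home"].any
        (fun word => PySem.Str.isIn word text)) then
      "Offers unusually high rewards for vague or minimal job requirements."
    else
      "The job structure and language match known fraudulent recruitment patterns."
  else
    if (["interview", "assessment", "procedure", "application"].any
        (fun word => PySem.Str.isIn word text)) then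
      "Follows a structured recruitment process including professional evaluations."
    else if (["responsibilities", "requirements", "skills", "experience"].any
        (fun word => PySem.Str.isIn word text)) then
      "Clearly defines technical skills and specific professional responsibilities."
    else
      "Exhibits professional corporate communication and standard industry terminology."

-- ===== PORT B =====
def pvFakePairs : List (String × Nat) :=
  [ ("payment", 0), ("fee", 0), ("money", 0), ("bank", 0), ("account", 0), ("transfer", 0),
    ("urgently", 1), ("limited", 1), ("immediate", 1), ("whatsapp", 1), ("telegram", 1),
    ("no experience", 2), ("easy", 2), ("high pay", 2), ("work from home", 2) ]

def pvFakeReasons : List String :=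
  [ "Contains references to personal financial transactions or upfront payments.",
    "Uses high-pressure tactics or unprofessional communication channels.",
    "Offers unusually high rewards for vague or minimal job requirements.",
    "The job structure and language match known fraudulent recruitment patterns." ]

def pvRealPairs : List (String × Nat) :=
  [ ("interview", 0), ("assessment", 0), ("procedure", 0), ("application", 0),
    ("responsibilities", 1), ("requirements", 1), ("skills", 1), ("experience", 1) ]

def pvRealReasons : List String :=
  [ "Follows a structured recruitment process including professional evaluations.",
    "Clearly defines technical skills and specific professional responsibilities.",
    "Exhibits professional corporate communication and standard industry terminology." ]

def get_reason_alt (text : String) (prediction : String) : String :=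
  let t := PySem.Str.lower text
  let pr :=
    if prediction == "Fake" then (pvFakePairs, pvFakeReasons)
    else (pvRealPairs, pvRealReasons)
  let best := pr.1.foldl
    (fun best p => if PySem.Str.isIn p.1 t then Nat.min best p.2 else best)
    (pr.2.length - 1)
  pr.2.getD best ""

-- ===== PRECONDITION & SPEC =====
def Spec_get_reason (text : String) (prediction : String) (out : String) : Prop := out = get_reason_alt text prediction
instance (text : String) (prediction : String) (out : String) : Decidable (Spec_get_reason text prediction out) := by unfold Spec_get_reason; infer_instance

-- ===== CLAIM (what is proved, stated in full; the proofs are below) =====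
def Claim_equal_get_reason : Prop := ∀ (text : String) (prediction : String), Dom_get_reason text prediction → Spec_get_reason text prediction (get_reason text prediction)

-- ===== LEMMAS AND PROOFS =====

-- folding the min-update over a constant-priority group collapses to a single `any` test
theorem pv_group_fold (t : String) (i : Nat) (kws : List String) (acc : Nat) :
    (kws.map (fun k => (k, i))).foldl
      (fun best p => if PySem.Str.isIn p.1 t then Nat.min best p.2 else best) acc
    = if kws.any (fun k => PySem.Str.isIn k t) then Nat.min acc i else acc := by
  induction kws generalizing acc with
  | nil => simp
  | cons k ks ih =>
    rw [List.map_cons, List.foldl_cons, List.any_cons, ih]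
    cases h : PySem.Str.isIn k t <;> simp

theorem get_reason_spec : Claim_equal_get_reason := by
  intro text prediction _
  unfold Spec_get_reason get_reason get_reason_alt
  by_cases hp : prediction == "Fake"
  · rw [if_pos hp, if_pos hp]
    have hpairs : pvFakePairs =
        (["payment", "fee", "money", "bank", "account", "transfer"].map (fun k => (k, 0))) ++
        (["urgently", "limited", "immediate", "whatsapp", "telegram"].map (fun k => (k, 1))) ++
        (["no experience", "easy", "high pay", "work from home"].map (fun k => (k, 2))) := rfl
    simp only [hpairs]
    rw [List.foldl_append, List.foldl_append, pv_group_fold, pv_group_fold, pv_group_fold]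
    cases h0 : (["payment", "fee", "money", "bank", "account", "transfer"].any
        (fun k => PySem.Str.isIn k (PySem.Str.lower text))) <;>
      cases h1 : (["urgently", "limited", "immediate", "whatsapp", "telegram"].any
        (fun k => PySem.Str.isIn k (PySem.Str.lower text))) <;>
      cases h2 : (["no experience", "easy", "high pay", "work from home"].any
        (fun k => PySem.Str.isIn k (PySem.Str.lower text))) <;> rfl
  · rw [if_neg hp, if_neg hp]
    have hpairs : pvRealPairs =
        (["interview", "assessment", "procedure", "application"].map (fun k => (k, 0))) ++
        (["responsibilities", "requirements", "skills", "experience"].map (fun k => (k, 1))) := rfl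
    simp only [hpairs]
    rw [List.foldl_append, pv_group_fold, pv_group_fold]
    cases h0 : (["interview", "assessment", "procedure", "application"].any
        (fun k => PySem.Str.isIn k (PySem.Str.lower text))) <;>
      cases h1 : (["responsibilities", "requirements", "skills", "experience"].any
        (fun k => PySem.Str.isIn k (PySem.Str.lower text))) <;> rfl
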